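-- pv_equiv track=rewrite | github.com/archerckk/PyTest | Ar_Script/ar_319_练习_协程.py | get_zhishu
-- ===== SOURCE A (Python) =====
-- def is_zhishu(number):
--
--     if number>1:
--         if number==2:
--             return True
--         if number%2==0:
--             return  False
--         else:
--             for i in range(3,number):
--                 if number%i==0:
--                     return False
--             return True
--     return False
--
-- def get_zhishu(ignore_range, numbers):
--     number=1
--     result=[]
--     while len(result)<numbers:
--         if number<ignore_range:
--            pass
--         else:
--             if is_zhishu(number):
--                 result.append(number)
--                 yield number
--
--         number+=1
-- ===== SOURCE B (Python) =====
-- def get_zhishu(ignore_range, numbers):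
--     # Trial division only by odd divisors up to sqrt(candidate); start directly
--     # at the first candidate that can qualify instead of counting up from 1,
--     # with a single fused count/candidate loop (no separate skip phase).
--     def is_prime(n):
--         if n < 2:
--             return False
--         if n % 2 == 0:
--             return n == 2
--         i = 3
--         while i * i <= n:
--             if n % i == 0:
--                 return False
--             i += 2
--         return True
--
--     count = 0
--     candidate = max(2, ignore_range)
--     while count < numbers:
--         if is_prime(candidate):
--             yield candidate
--             count += 1
--         candidate += 1
-- ===== Notes on version B (the rewrite author's own statement) =====
-- stated objective: faster
-- what changed: B trial-divides only by odd divisors up to sqrt(candidate) and starts a single fused scan at max(2, ignore_range), instead of counting up from 1 and trial-dividing each candidate c by every i in 3..c-1.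
import Mathlib
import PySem

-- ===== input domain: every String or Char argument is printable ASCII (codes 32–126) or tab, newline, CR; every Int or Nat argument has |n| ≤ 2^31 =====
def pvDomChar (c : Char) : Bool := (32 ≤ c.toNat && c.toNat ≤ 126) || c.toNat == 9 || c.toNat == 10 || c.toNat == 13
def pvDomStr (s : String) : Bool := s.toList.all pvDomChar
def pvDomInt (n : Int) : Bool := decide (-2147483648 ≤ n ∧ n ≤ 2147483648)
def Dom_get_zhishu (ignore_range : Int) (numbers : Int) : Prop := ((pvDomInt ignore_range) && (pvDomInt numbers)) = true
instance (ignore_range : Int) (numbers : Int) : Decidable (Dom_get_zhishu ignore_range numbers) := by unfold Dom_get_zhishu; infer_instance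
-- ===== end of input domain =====

-- B replaces A's full trial division (every i in 3..n-1) by trial division by odd i with i*i ≤ n,
-- and runs one fused count/candidate loop starting at max(2, ignore_range) instead of counting up
-- from 1 with a skip branch and a result accumulator; return-value equivalence is proved (A is a
-- Python generator; the List Int is the sequence of yielded values). Both while loops are ported
-- with an explicit fuel that only makes them total; the lemmas below prove the fuel suffices
-- (via Bertrand's postulate), so neither port ever hits the fuel bound.

-- ===== PORT A =====
def is_zhishu (number : Int) : Bool :=
  if number > 1 then
    if number == 2 then true
    else if PySem.Int.mod number 2 == 0 then false
    else (PySem.List.pyRange 3 number 1).all (fun i => !(PySem.Int.mod number i == 0))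
  else false

-- totality fuel for A's 'while len(result) < numbers' loop (one unit per candidate number);
-- sufficiency is proved below, the loop always returns before exhausting it
def fuelA (ignore_range : Int) (numbers : Int) : Nat :=
  ignore_range.natAbs + 4 ^ numbers.toNat * (ignore_range.natAbs + 4) + 4

-- A's while loop: state = current number and the accumulated result list
def loopA (ig : Int) (nums : Int) : Nat → Int → List Int → List Int
  | 0, _, res => res
  | f + 1, number, res =>
    if (res.length : Int) < nums then
      if number < ig then loopA ig nums f (number + 1) res
      else if is_zhishu number then loopA ig nums f (number + 1) (res ++ [number])
      else loopA ig nums f (number + 1) res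
    else res

def get_zhishu (ignore_range : Int) (numbers : Int) : List Int :=
  loopA ignore_range numbers (fuelA ignore_range numbers) 1 []

-- ===== PORT B =====
-- while i*i <= n: if n % i == 0: return False; i += 2 / else: return True
-- (fuel bounds the iterations; i grows by 2 per step, so n.toNat + 1 steps always suffice)
def oddLoop : Nat → Int → Int → Bool
  | 0, _, _ => true
  | f + 1, n, i =>
    if i * i ≤ n then
      (if PySem.Int.mod n i == 0 then false else oddLoop f n (i + 2))
    else true

def is_prime_alt (n : Int) : Bool :=
  if n < 2 then false
  else if PySem.Int.mod n 2 == 0 then n == 2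
  else oddLoop (n.toNat + 1) n 3

-- totality fuel for B's fused scan; sufficiency proved below
def fuelB (ignore_range : Int) (numbers : Int) : Nat :=
  4 ^ numbers.toNat * ((max 2 ignore_range).toNat + 2)

-- B's single fused while loop: state = primes still to emit, current candidate
def emitB : Nat → Nat → Int → List Int
  | 0, _, _ => []
  | _ + 1, 0, _ => []
  | f + 1, c + 1, cand =>
    if is_prime_alt cand then cand :: emitB f c (cand + 1)
    else emitB f (c + 1) (cand + 1)

def get_zhishu_alt (ignore_range : Int) (numbers : Int) : List Int :=
  emitB (fuelB ignore_range numbers) numbers.toNat (max 2 ignore_range)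

-- ===== PRECONDITION & SPEC =====
def Spec_get_zhishu (ignore_range : Int) (numbers : Int) (out : List Int) : Prop := out = get_zhishu_alt ignore_range numbers
instance (ignore_range : Int) (numbers : Int) (out : List Int) : Decidable (Spec_get_zhishu ignore_range numbers out) := by unfold Spec_get_zhishu; infer_instance

-- ===== CLAIM (what is proved, stated in full; the proofs are below) =====
def Claim_equal_get_zhishu : Prop := ∀ (ignore_range : Int) (numbers : Int), Dom_get_zhishu ignore_range numbers → Spec_get_zhishu ignore_range numbers (get_zhishu ignore_range numbers)

-- ===== LEMMAS AND PROOFS =====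

-- A's trial-division test answers exactly primality
theorem is_zhishu_eq (m : Int) : is_zhishu m = decide (2 ≤ m ∧ m.toNat.Prime) := by
  unfold is_zhishu
  rcases lt_or_ge m 2 with h2 | h2
  · rw [if_neg (show ¬ m > 1 by omega)]
    simp; omega
  · rcases eq_or_lt_of_le h2 with he | h3
    · subst he; simp; decide
    · have hm1 : m > 1 := by omega
      have hN : m = ((m.toNat : Int)) := by omega
      set N := m.toNat with hNdef
      have hN3 : 3 ≤ N := by omega
      rw [if_pos hm1, if_neg (show ¬ m == 2 by simp; omega)]
      by_cases hev : (2 : Int) ∣ m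
      · have hz : PySem.Int.mod m 2 = 0 := (PySem.Int.mod_eq_zero_iff_dvd m 2).2 hev
        rw [if_pos (by simpa using hz)]
        have h2N : 2 ∣ N := by
          have := hev; rw [hN] at this; exact_mod_cast this
        have hnp : ¬ N.Prime := by
          intro hp
          rcases Nat.Prime.eq_one_or_self_of_dvd hp 2 h2N with h | h <;> omega
        simp [hnp]
      · have hmod : ¬ PySem.Int.mod m 2 = 0 := by
          intro h; exact hev ((PySem.Int.mod_eq_zero_iff_dvd m 2).1 h)
        rw [if_neg (by simpa using hmod)]
        have hodd : ¬ 2 ∣ N := by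
          intro h; apply hev; rw [hN]; exact_mod_cast h
        rw [Bool.eq_iff_iff]
        simp only [List.all_eq_true, decide_eq_true_eq]
        constructor
        · intro hall
          refine ⟨h2, ?_⟩
          rw [Nat.prime_def_lt]
          refine ⟨by omega, ?_⟩
          intro d hdlt hddvd
          by_contra hd1
          have hd0 : d ≠ 0 := by rintro rfl; rw [Nat.zero_dvd] at hddvd; omega
          have hd2 : d ≠ 2 := by rintro rfl; exact hodd hddvd
          have hd3 : 3 ≤ d := by omega
          have hmem : (d : Int) ∈ PySem.List.pyRange 3 m 1 := by
            rw [PySem.List.mem_pyRange_one]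
            constructor
            · exact_mod_cast hd3
            · rw [hN]; exact_mod_cast hdlt
          have := hall (d : Int) hmem
          have hz : PySem.Int.mod m d = 0 := by
            apply (PySem.Int.mod_eq_zero_iff_dvd m d).2
            rw [hN]; exact_mod_cast hddvd
          simp [hz] at this
        · rintro ⟨-, hp⟩ i hi
          rw [PySem.List.mem_pyRange_one] at hi
          simp only [Bool.not_eq_true', beq_eq_false_iff_ne, ne_eq]
          intro hz
          have hdvd : i ∣ m := (PySem.Int.mod_eq_zero_iff_dvd m i).1 hz
          have hiN : i.toNat ∣ N := by
            have : (i.toNat : Int) ∣ (N : Int) := by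
              rw [show (i.toNat : Int) = i by omega, ← hN]; exact hdvd
            exact_mod_cast this
          rcases Nat.Prime.eq_one_or_self_of_dvd hp _ hiN with h1 | h1 <;> omega

-- oddLoop with enough fuel answers: no odd j ≥ i with j*j ≤ n divides n (for odd i ≥ 3)
theorem oddLoop_iff (n : Int) : ∀ (F : Nat) (i : Int), (n + 1 - i).toNat ≤ F → 3 ≤ i → i % 2 = 1 →
    (oddLoop F n i = true ↔ ∀ j : Int, i ≤ j → j * j ≤ n → j % 2 = 1 → ¬ j ∣ n) := by
  intro F
  induction F with
  | zero =>
    intro i hF hi3 _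
    have hin : n < i := by omega
    have hgt : ¬ i * i ≤ n := by nlinarith
    rw [show oddLoop 0 n i = true from rfl]
    constructor
    · intro _ j hij hjj _ _
      nlinarith
    · intro _; rfl
  | succ F ih =>
    intro i hF hi3 hiodd
    show (if i * i ≤ n then (if PySem.Int.mod n i == 0 then false else oddLoop F n (i + 2)) else true) = true ↔ _
    by_cases h : i * i ≤ n
    · rw [if_pos h]
      by_cases hz : PySem.Int.mod n i = 0
      · simp only [hz, beq_self_eq_true, if_pos]
        constructor
        · intro hfalse; exact absurd hfalse (by simp)
        · intro hall
          exact absurd ((PySem.Int.mod_eq_zero_iff_dvd n i).1 hz)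
            (hall i le_rfl h hiodd)
      · rw [if_neg (by simpa using hz)]
        have hin : i ≤ n := by nlinarith
        rw [ih (i + 2) (by omega) (by omega) (by omega)]
        constructor
        · intro hall j hij hjj hjodd hjd
          rcases eq_or_lt_of_le hij with he | hlt'
          · subst he; exact hz ((PySem.Int.mod_eq_zero_iff_dvd n _).2 hjd)
          · exact hall j (by omega) hjj hjodd hjd
        · intro hall j hij hjj hjodd hjd
          exact hall j (by omega) hjj hjodd hjd
    · rw [if_neg h]
      constructor
      · intro _ j hij hjj _ _
        have : i * i ≤ j * j := by nlinarith
        omega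
      · intro _; rfl

-- B's sqrt trial division also answers exactly primality
theorem is_prime_alt_eq (m : Int) : is_prime_alt m = decide (2 ≤ m ∧ m.toNat.Prime) := by
  unfold is_prime_alt
  rcases lt_or_ge m 2 with h2 | h2
  · rw [if_pos h2]; simp; omega
  · rw [if_neg (by omega)]
    have hN : m = ((m.toNat : Int)) := by omega
    set N := m.toNat with hNdef
    have hN2 : 2 ≤ N := by omega
    by_cases hev : (2 : Int) ∣ m
    · have hm0 : PySem.Int.mod m 2 = 0 := (PySem.Int.mod_eq_zero_iff_dvd m 2).2 hev
      rw [if_pos (by simpa using hm0)]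
      have h2N : 2 ∣ N := by have := hev; rw [hN] at this; exact_mod_cast this
      by_cases hm2 : m = 2
      · subst hm2; simp; decide
      · have hnp : ¬ N.Prime := by
          intro hp
          rcases Nat.Prime.eq_one_or_self_of_dvd hp 2 h2N with h | h <;> omega
        simp [hnp, hm2]
    · have hm0 : ¬ PySem.Int.mod m 2 = 0 := fun h => hev ((PySem.Int.mod_eq_zero_iff_dvd m 2).1 h)
      rw [if_neg (by simpa using hm0)]
      have hodd2 : ¬ 2 ∣ N := fun h => hev (by rw [hN]; exact_mod_cast h)
      have hN3 : 3 ≤ N := by omega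
      rw [Bool.eq_iff_iff, oddLoop_iff m (m.toNat + 1) 3 (by omega) le_rfl (by decide)]
      simp only [decide_eq_true_eq]
      constructor
      · intro hall
        refine ⟨h2, ?_⟩
        by_contra hp
        set d := N.minFac with hd
        have hdd : d ∣ N := Nat.minFac_dvd N
        have hdp : d.Prime := Nat.minFac_prime (by omega)
        have hdne2 : d ≠ 2 := by rintro h; rw [h] at hdd; exact hodd2 hdd
        have hd3 : 3 ≤ d := by have := hdp.two_le; omega
        have hdodd : (d : Int) % 2 = 1 := by
          have h2d : ¬ 2 ∣ d := by
            intro h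
            rcases Nat.Prime.eq_one_or_self_of_dvd hdp 2 h with h' | h' <;> omega
          omega
        have hsq : d * d ≤ N := by
          have := Nat.minFac_sq_le_self (by omega : 0 < N) hp
          simpa [pow_two] using this
        exact hall (d : Int) (by exact_mod_cast hd3)
          (by rw [hN]; exact_mod_cast hsq) hdodd (by rw [hN]; exact_mod_cast hdd)
      · rintro ⟨-, hp⟩ j h3j hjj hjodd hjd
        have hjN : j.toNat ∣ N := by
          have : (j.toNat : Int) ∣ (N : Int) := by
            rw [show (j.toNat : Int) = j by omega, ← hN]; exact hjd
          exact_mod_cast this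
        rcases Nat.Prime.eq_one_or_self_of_dvd hp _ hjN with h1 | h1
        · omega
        · have hjm : j = m := by omega
          nlinarith

theorem zhishu_eq_alt (m : Int) : is_zhishu m = is_prime_alt m := by
  rw [is_zhishu_eq, is_prime_alt_eq]

theorem existsPrimeAtLeast (n : Int) : ∃ k : Nat, is_prime_alt (n + k) = true := by
  obtain ⟨p, hkp, hp⟩ := Nat.exists_infinite_primes n.toNat
  have hn : n ≤ (p : Int) := le_trans (Int.self_le_toNat _) (by exact_mod_cast hkp)
  refine ⟨((p : Int) - n).toNat, ?_⟩
  rw [show n + ((((p : Int) - n).toNat : Int)) = (p : Int) by omega, is_prime_alt_eq]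
  simp only [decide_eq_true_eq]
  exact ⟨by exact_mod_cast hp.two_le, by simpa using hp⟩

-- proof-only: the next candidate from n on that passes the primality test
def scanB (n : Int) : Int := n + (Nat.find (existsPrimeAtLeast n) : Int)

-- proof-only: the ideal (unfueled) scan both loops are proved equal to
def loopB : Nat → Int → List Int
  | 0, _ => []
  | r + 1, c => scanB c :: loopB r (scanB c + 1)

-- proof-only: the exact number of loop iterations the ideal scan performs
def steps : Nat → Int → Nat
  | 0, _ => 0
  | r + 1, c => (scanB c - c).toNat + 1 + steps r (scanB c + 1)

theorem scanB_le (n : Int) : n ≤ scanB n := by unfold scanB; omega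

theorem scanB_pass (n : Int) : is_prime_alt (scanB n) = true := Nat.find_spec (existsPrimeAtLeast n)

theorem scanB_min (n m : Int) (hnm : n ≤ m) (hms : m < scanB n) : is_prime_alt m ≠ true := by
  unfold scanB at hms
  have := Nat.find_min (existsPrimeAtLeast n) (m := (m - n).toNat) (by omega)
  rw [show n + (((m - n).toNat : Int)) = m by omega] at this
  exact this

theorem scanB_eq_self (n : Int) (h : is_prime_alt n = true) : scanB n = n := by
  unfold scanB
  have : Nat.find (existsPrimeAtLeast n) = 0 := by
    rw [Nat.find_eq_zero]; simpa using h
  omega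

theorem scanB_shift (n : Int) (h : is_prime_alt n = false) : scanB n = scanB (n + 1) := by
  have h1 : scanB n ≠ n := by
    intro he; have := scanB_pass n; rw [he, h] at this; cases this
  have h2 : n + 1 ≤ scanB n := by have := scanB_le n; omega
  have h3 : scanB (n + 1) ≤ scanB n := by
    have hf := Nat.find_min' (existsPrimeAtLeast (n + 1)) (m := (scanB n - (n + 1)).toNat)
      (by rw [show (n + 1) + (((scanB n - (n + 1)).toNat : Int)) = scanB n by omega]
          exact scanB_pass n)
    unfold scanB at hf h2 ⊢
    omega
  have h4 : ¬ scanB (n + 1) < scanB n := by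
    intro hlt
    exact scanB_min n (scanB (n + 1)) (by have := scanB_le (n + 1); omega) hlt (scanB_pass (n + 1))
  omega

-- Bertrand's postulate, in the form the step bound needs
theorem scanB_bertrand (c : Int) (hc : 2 ≤ c) : scanB c + 2 ≤ 2 * c := by
  obtain ⟨p, hp, hlt, hle⟩ := Nat.exists_prime_lt_and_le_two_mul (c - 1).toNat (by omega)
  have hcp : c ≤ (p : Int) := by omega
  have hpass : is_prime_alt (p : Int) = true := by
    rw [is_prime_alt_eq]
    simp only [decide_eq_true_eq]
    exact ⟨by exact_mod_cast hp.two_le, by simpa using hp⟩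
  have hsle : scanB c ≤ (p : Int) := by
    unfold scanB
    have := Nat.find_min' (existsPrimeAtLeast c) (m := ((p : Int) - c).toNat) ?_
    · omega
    · rw [show c + ((((p : Int) - c).toNat : Int)) = (p : Int) by omega]
      exact hpass
  omega

theorem steps_prime (r : Nat) (c : Int) (h : is_prime_alt c = true) :
    steps (r + 1) c = steps r (c + 1) + 1 := by
  show (scanB c - c).toNat + 1 + steps r (scanB c + 1) = _
  rw [scanB_eq_self c h]
  omega

theorem steps_composite (r : Nat) (c : Int) (h : is_prime_alt c = false) :
    steps (r + 1) c = steps (r + 1) (c + 1) + 1 := by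
  have hs := scanB_shift c h
  have h1 : scanB c ≠ c := by
    intro he; have := scanB_pass c; rw [he, h] at this; cases this
  have h2 : c + 1 ≤ scanB c := by have := scanB_le c; omega
  show (scanB c - c).toNat + 1 + steps r (scanB c + 1) =
    ((scanB (c + 1) - (c + 1)).toNat + 1 + steps r (scanB (c + 1) + 1)) + 1
  rw [← hs]
  omega

-- the fuel bound: the ideal scan from c emitting r primes takes at most 4^r * (c.toNat + 2) iterations
theorem steps_le (r : Nat) : ∀ c : Int, 2 ≤ c → steps r c ≤ 4 ^ r * (c.toNat + 2) := by
  induction r with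
  | zero => intro c _; simp [steps]
  | succ r ih =>
    intro c hc
    have hle := scanB_le c
    have hb := scanB_bertrand c hc
    have hih := ih (scanB c + 1) (by omega)
    show (scanB c - c).toNat + 1 + steps r (scanB c + 1) ≤ 4 ^ (r + 1) * (c.toNat + 2)
    have hmul : 4 ^ r * ((scanB c + 1).toNat + 2) ≤ 4 ^ r * (2 * c.toNat + 1) :=
      Nat.mul_le_mul_left _ (by omega)
    have hone : 1 * (2 * c.toNat + 7) ≤ 4 ^ r * (2 * c.toNat + 7) :=
      Nat.mul_le_mul_right _ (Nat.one_le_two_pow.trans (Nat.pow_le_pow_left (by norm_num) r))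
    have hsum : 4 ^ r * (2 * c.toNat + 1) + 4 ^ r * (2 * c.toNat + 7) = 4 ^ (r + 1) * (c.toNat + 2) := by
      ring
    omega

-- B's fueled loop equals the ideal scan whenever the fuel covers the iteration count
theorem emitB_eq : ∀ (f count : Nat) (c : Int), steps count c ≤ f → emitB f count c = loopB count c := by
  intro f
  induction f with
  | zero =>
    intro count c hf
    cases count with
    | zero => rfl
    | succ r =>
      exfalso
      have : 1 ≤ steps (r + 1) c := by
        show 1 ≤ (scanB c - c).toNat + 1 + steps r (scanB c + 1); omega
      omega
  | succ f ih =>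
    intro count c hf
    cases count with
    | zero => rfl
    | succ r =>
      by_cases hp : is_prime_alt c = true
      · show (if is_prime_alt c then c :: emitB f r (c + 1) else emitB f (r + 1) (c + 1)) = _
        rw [if_pos hp]
        have hst := steps_prime r c hp
        rw [ih r (c + 1) (by omega)]
        show _ = scanB c :: loopB r (scanB c + 1)
        rw [scanB_eq_self c hp]
      · have hpf : is_prime_alt c = false := by simpa using hp
        show (if is_prime_alt c then c :: emitB f r (c + 1) else emitB f (r + 1) (c + 1)) = _
        rw [if_neg hp]
        have hst := steps_composite r c hpf
        rw [ih (r + 1) (c + 1) (by omega)]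
        show loopB (r + 1) (c + 1) = loopB (r + 1) c
        show scanB (c + 1) :: loopB r (scanB (c + 1) + 1) = scanB c :: loopB r (scanB c + 1)
        rw [scanB_shift c hpf]

-- proof-only ghost of A's loop with the result length replaced by a countdown
def loopA' (ig : Int) : Nat → Int → Nat → List Int
  | 0, _, _ => []
  | _ + 1, _, 0 => []
  | f + 1, number, r + 1 =>
    if number < ig then loopA' ig f (number + 1) (r + 1)
    else if is_zhishu number then number :: loopA' ig f (number + 1) r
    else loopA' ig f (number + 1) (r + 1)

theorem loopA'_rem0 (ig : Int) (f : Nat) (c : Int) : loopA' ig f c 0 = [] := by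
  cases f <;> rfl

-- the accumulator of A's port only prepends: loopA = res ++ (countdown ghost)
theorem loopA_acc (ig nums : Int) : ∀ (f : Nat) (number : Int) (res : List Int),
    loopA ig nums f number res = res ++ loopA' ig f number ((nums - res.length).toNat) := by
  intro f
  induction f with
  | zero =>
    intro number res
    show res = res ++ loopA' ig 0 number ((nums - (res.length : Int)).toNat)
    rw [show loopA' ig 0 number ((nums - (res.length : Int)).toNat) = [] from rfl, List.append_nil]
  | succ f ih =>
    intro number res
    show (if (res.length : Int) < nums then _ else res) = _
    by_cases hlt : (res.length : Int) < nums
    · rw [if_pos hlt]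
      have ht : (nums - res.length).toNat = ((nums - res.length).toNat - 1) + 1 := by omega
      rw [ht]
      show (if number < ig then loopA ig nums f (number + 1) res
        else if is_zhishu number then loopA ig nums f (number + 1) (res ++ [number])
        else loopA ig nums f (number + 1) res) = res ++ loopA' ig (f + 1) number _
      by_cases hig : number < ig
      · rw [if_pos hig]
        show _ = res ++ loopA' ig (f + 1) number (((nums - res.length).toNat - 1) + 1)
        show _ = res ++ (if number < ig then loopA' ig f (number + 1) (((nums - res.length).toNat - 1) + 1)
          else if is_zhishu number then number :: loopA' ig f (number + 1) ((nums - res.length).toNat - 1)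
          else loopA' ig f (number + 1) (((nums - res.length).toNat - 1) + 1))
        rw [if_pos hig, ih, ← ht]
      · rw [if_neg hig]
        show _ = res ++ (if number < ig then loopA' ig f (number + 1) (((nums - res.length).toNat - 1) + 1)
          else if is_zhishu number then number :: loopA' ig f (number + 1) ((nums - res.length).toNat - 1)
          else loopA' ig f (number + 1) (((nums - res.length).toNat - 1) + 1))
        rw [if_neg hig]
        by_cases hz : is_zhishu number = true
        · rw [if_pos hz, if_pos hz, ih]
          have hlen : (nums - ((res ++ [number]).length : Int)).toNat = (nums - res.length).toNat - 1 := by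
            simp only [List.length_append, List.length_cons, List.length_nil]
            push_cast
            omega
          rw [hlen, List.append_assoc]
          rfl
        · rw [if_neg hz, if_neg hz, ih, ← ht]
    · rw [if_neg hlt]
      have ht : (nums - res.length).toNat = 0 := by omega
      rw [ht, loopA'_rem0, List.append_nil]

-- the ghost loop does nothing below max 2 ig: numbers < ig are skipped, 1 is not prime
theorem loopA'_skip (ig : Int) : ∀ (j : Nat) (f : Nat) (c : Int) (rem : Nat),
    1 ≤ c → c + (j : Int) = max 2 ig → loopA' ig (f + j) c rem = loopA' ig f (max 2 ig) rem := by
  intro j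
  induction j with
  | zero =>
    intro f c rem _ hcj
    have : c = max 2 ig := by omega
    subst this; rfl
  | succ j ih =>
    intro f c rem hc hcj
    have hcM : c < max 2 ig := by omega
    cases rem with
    | zero => rw [loopA'_rem0, loopA'_rem0]
    | succ r =>
      have step : loopA' ig (f + j + 1) c (r + 1) = loopA' ig (f + j) (c + 1) (r + 1) := by
        show (if c < ig then loopA' ig (f + j) (c + 1) (r + 1)
          else if is_zhishu c then c :: loopA' ig (f + j) (c + 1) r
          else loopA' ig (f + j) (c + 1) (r + 1)) = _
        by_cases hig : c < ig
        · rw [if_pos hig]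
        · have hc2 : c < 2 := by
            have : max 2 ig ≤ max 2 c := by
              apply max_le (le_max_left _ _)
              omega
            rcases max_cases 2 c with ⟨he, _⟩ | ⟨he, h2c⟩
            · omega
            · rw [he] at this; omega
          have hz : is_zhishu c = false := by
            rw [is_zhishu_eq]
            simp only [decide_eq_false_iff_not, not_and]
            intro h; omega
          rw [if_neg hig, if_neg (by simp [hz])]
      have : f + (j + 1) = (f + j) + 1 := by omega
      rw [this, step, ih f (c + 1) (r + 1) (by omega) (by omega)]

-- from max 2 ig on, the ghost loop equals the ideal scan (given enough fuel)
theorem loopA'_main (ig : Int) : ∀ (f : Nat) (c : Int) (rem : Nat),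
    ig ≤ c → 2 ≤ c → steps rem c ≤ f → loopA' ig f c rem = loopB rem c := by
  intro f
  induction f with
  | zero =>
    intro c rem _ _ hf
    cases rem with
    | zero => rfl
    | succ r =>
      exfalso
      have : 1 ≤ steps (r + 1) c := by
        show 1 ≤ (scanB c - c).toNat + 1 + steps r (scanB c + 1); omega
      omega
  | succ f ih =>
    intro c rem hig hc2 hf
    cases rem with
    | zero => rfl
    | succ r =>
      show (if c < ig then loopA' ig f (c + 1) (r + 1)
        else if is_zhishu c then c :: loopA' ig f (c + 1) r
        else loopA' ig f (c + 1) (r + 1)) = _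
      rw [if_neg (by omega)]
      by_cases hp : is_prime_alt c = true
      · rw [if_pos (by rw [zhishu_eq_alt]; exact hp)]
        have hst := steps_prime r c hp
        rw [ih (c + 1) r (by omega) (by omega) (by omega)]
        show _ = scanB c :: loopB r (scanB c + 1)
        rw [scanB_eq_self c hp]
      · have hpf : is_prime_alt c = false := by simpa using hp
        rw [if_neg (by rw [zhishu_eq_alt]; simp [hpf])]
        have hst := steps_composite r c hpf
        rw [ih (c + 1) (r + 1) (by omega) (by omega) (by omega)]
        show loopB (r + 1) (c + 1) = loopB (r + 1) c
        show scanB (c + 1) :: loopB r (scanB (c + 1) + 1) = scanB c :: loopB r (scanB c + 1)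
        rw [scanB_shift c hpf]

-- ===== VERDICT (by name: the statement is the Claim_ definition above) =====
theorem get_zhishu_spec : Claim_equal_get_zhishu := by
  intro ig nums _
  unfold Spec_get_zhishu get_zhishu get_zhishu_alt
  set M : Int := max 2 ig with hM
  set N : Nat := nums.toNat with hN
  have hM2 : (2 : Int) ≤ M := le_max_left _ _
  have hMig : ig ≤ M := le_max_right _ _
  have hMub : M = 2 ∨ M = ig := max_choice 2 ig
  -- the common bound on the iteration count of the main phase
  have hsteps := steps_le N M hM2
  have hMna : M.toNat + 2 ≤ ig.natAbs + 4 := by rcases hMub with h | h <;> omega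
  have hpow : 4 ^ N * (M.toNat + 2) ≤ 4 ^ N * (ig.natAbs + 4) :=
    Nat.mul_le_mul_left _ hMna
  -- A's side: peel the accumulator, then the skip phase, then the main phase
  rw [loopA_acc]
  simp only [List.length_nil, Nat.cast_zero, List.nil_append]
  have hsub : (nums - (0 : Int)).toNat = N := by omega
  rw [hsub]
  set j : Nat := (M - 1).toNat with hj
  have hjle : j ≤ ig.natAbs + 1 := by rcases hMub with h | h <;> omega
  have hfa : fuelA ig nums = (fuelA ig nums - j) + j := by
    unfold fuelA
    omega
  rw [hfa, loopA'_skip ig j (fuelA ig nums - j) 1 N (by omega) (by omega)]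
  rw [loopA'_main ig (fuelA ig nums - j) M N hMig hM2 (by unfold fuelA; rw [← hN]; omega)]
  -- B's side: its fuel is exactly the proven bound
  rw [emitB_eq (fuelB ig nums) N M (by unfold fuelB; rw [← hM, ← hN]; omega)]
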